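-- pv_equiv track=rewrite | github.com/itehax/maths_stuff | algo_algebra_ex.py | is_div_by_7
-- ===== SOURCE A (Python) =====
-- from math import prod
--
-- def get_base_coefficient(x: int) -> list:
--     coefficients = []
--     step = 10
--     while True:
--         fixup = step // 10
--         coef = (x % step) // fixup
--         coefficients.append(coef)
--         x = x - (coef * fixup)
--         if x == 0:
--             break
--         step *= 10
--     return coefficients
--
-- def is_div_by_7(x: int) -> bool:
--     coefs = get_base_coefficient(x)
--     # add missing zeros
--     fixup = len(coefs) % 3
--     if fixup != 0:
--         for _ in range(3 - fixup):
--             coefs.append(0)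
--
--     return (
--         sum([pow(-1, i) * prod(coefs[i : i + 3]) for i in range(0, len(coefs), 3)]) % 7
--         == 0
--     )
-- ===== SOURCE B (Python) =====
-- def is_div_by_7(x: int) -> bool:
--     # Arithmetic recursion in base 1000: no digit list, no padding, no slicing.
--     # alt(x) = p(x % 1000) - alt(x // 1000), where p(c) is the product of the
--     # (up to three) digits of the chunk c; nesting the subtraction produces
--     # exactly the alternating signs, and a partial top chunk's product is 0
--     # because its missing high digits are 0.
--     def alt(x: int) -> int:
--         if x == 0:
--             return 0
--         c = x % 1000
--         return (c % 10) * (c // 10 % 10) * (c // 100) - alt(x // 1000)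
--     return alt(x) % 7 == 0
-- ===== Notes on version B (the rewrite author's own statement) =====
-- stated objective: simpler
-- what changed: B never builds a digit list: it recurses arithmetically on x in base-1000 chunks, alt(x) = digitprod(x % 1000) - alt(x // 1000), where the nested subtraction yields the alternating signs and a partial top chunk's product is automatically 0, replacing A's digit-list construction, zero-padding and slicing comprehension.
import Mathlib
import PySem

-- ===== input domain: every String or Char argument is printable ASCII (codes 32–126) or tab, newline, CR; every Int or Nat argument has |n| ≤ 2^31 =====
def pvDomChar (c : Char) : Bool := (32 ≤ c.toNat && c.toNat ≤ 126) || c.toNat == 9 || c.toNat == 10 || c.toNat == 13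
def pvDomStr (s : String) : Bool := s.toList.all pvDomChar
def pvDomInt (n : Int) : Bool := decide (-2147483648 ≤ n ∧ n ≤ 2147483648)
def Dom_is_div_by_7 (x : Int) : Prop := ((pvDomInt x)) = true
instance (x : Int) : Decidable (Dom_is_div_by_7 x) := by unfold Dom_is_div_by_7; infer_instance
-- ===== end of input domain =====

-- B replaces A's digit-list construction, zero-padding and slicing comprehension by an
-- arithmetic base-1000 recursion whose nested subtraction yields the alternating signs
-- (objective: simpler; no list is built at all).

-- ===== PORT A =====
-- 'while True' loop of get_base_coefficient; fuel only makes it total in Lean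
-- (64 is proven sufficient for every 0 ≤ x in Dom; on x < 0 Python A loops forever, excluded by Pre_).
def gbcLoop : Nat → Int → Int → List Int → List Int
  | 0, _, _, acc => acc
  | fuel+1, x, step, acc =>
    let fixup := PySem.Int.floordiv step 10
    let coef := PySem.Int.floordiv (PySem.Int.mod x step) fixup
    let acc' := acc ++ [coef]
    let x' := x - coef * fixup
    if x' = 0 then acc' else gbcLoop fuel x' (step * 10) acc'

def get_base_coefficient (x : Int) : List Int := gbcLoop 64 x 10 []

def is_div_by_7 (x : Int) : Bool :=
  let coefs := get_base_coefficient x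
  let fixup := PySem.Int.mod (coefs.length : Int) 3
  let coefs := if fixup ≠ 0 then
      (PySem.List.pyRange 0 (3 - fixup) 1).foldl (fun cs _ => cs ++ [(0 : Int)]) coefs
    else coefs
  decide (PySem.Int.mod
    (((PySem.List.pyRange 0 (coefs.length : Int) 3).map
        (fun i => (-1 : Int) ^ i.toNat * (PySem.List.slice coefs (some i) (some (i + 3))).prod)).sum)
    7 = 0)

-- ===== PORT B =====
-- the nested recursive helper 'alt' of Source B; fuel only makes it total in Lean
-- (64 suffices on Dom; on x < 0 Python B's recursion never terminates, excluded by Pre_).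
def altLoop : Nat → Int → Int
  | 0, _ => 0
  | fuel+1, x =>
    if x = 0 then 0
    else
      let c := PySem.Int.mod x 1000
      (PySem.Int.mod c 10) * (PySem.Int.mod (PySem.Int.floordiv c 10) 10)
        * (PySem.Int.floordiv c 100) - altLoop fuel (PySem.Int.floordiv x 1000)

def is_div_by_7_alt (x : Int) : Bool :=
  decide (PySem.Int.mod (altLoop 64 x) 7 = 0)

-- ===== PRECONDITION & SPEC =====
-- Pre_ excludes x < 0: there Python A's while-loop never terminates (and B's recursion does not either).
def Pre_is_div_by_7 (x : Int) : Prop := 0 ≤ x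
instance (x : Int) : Decidable (Pre_is_div_by_7 x) := by unfold Pre_is_div_by_7; infer_instance
def pvWitness_is_div_by_7 : Int := (1729)

def Spec_is_div_by_7 (x : Int) (out : Bool) : Prop := out = is_div_by_7_alt x
instance (x : Int) (out : Bool) : Decidable (Spec_is_div_by_7 x out) := by unfold Spec_is_div_by_7; infer_instance

-- ===== CLAIM (what is proved, stated in full; the proofs are below) =====
def Claim_equal_is_div_by_7 : Prop := ∀ (x : Int), Dom_is_div_by_7 x → Pre_is_div_by_7 x → Spec_is_div_by_7 x (is_div_by_7 x)

-- ===== LEMMAS AND PROOFS =====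

-- digits of n, least significant first; [] for n = 0 (the mathematical digit list)
def sdigits (n : Nat) : List Nat :=
  if h : n = 0 then [] else n % 10 :: sdigits (n / 10)
decreasing_by exact Nat.div_lt_self (Nat.pos_of_ne_zero h) (by norm_num)

-- A's coefficient list: like sdigits but [0] for n = 0
def sdigits1 (n : Nat) : List Nat :=
  if n < 10 then [n] else n % 10 :: sdigits1 (n / 10)
decreasing_by exact Nat.div_lt_self (by omega) (by norm_num)

lemma sdigits1_eq (n : Nat) : sdigits1 n = if n = 0 then [0] else sdigits n := by
  induction n using Nat.strong_induction_on with
  | _ n ih =>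
    rw [sdigits1, sdigits]
    by_cases h0 : n = 0
    · simp [h0]
    · by_cases h10 : n < 10
      · have h1 : n / 10 = 0 := Nat.div_eq_of_lt h10
        have h2 : n % 10 = n := Nat.mod_eq_of_lt h10
        simp [h0, h10, h1, h2]
        rw [sdigits]
        simp
      · have hd : n / 10 ≠ 0 := by
          intro h; have := Nat.lt_of_div_eq_zero (by norm_num) h; omega
        rw [ih (n / 10) (Nat.div_lt_self (by omega) (by norm_num))]
        simp [h0, h10, hd]

lemma gbcLoop_eq (fuel : Nat) : ∀ (q : Nat) (s : Int) (acc : List Int), 0 < s → (q : Int) < 10 ^ fuel → 1 ≤ fuel →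
    gbcLoop fuel ((q : Int) * s) (10 * s) acc = acc ++ (sdigits1 q).map (fun d : Nat => (d : Int)) := by
  induction fuel with
  | zero => intro _ _ _ _ _ h; omega
  | succ f ih =>
    intro q s acc hs hq _
    rw [gbcLoop]
    have hfix : PySem.Int.floordiv (10 * s) 10 = s := by
      rw [PySem.Int.floordiv_eq_ediv_of_pos (by norm_num)]
      rw [Int.mul_ediv_cancel_left _ (by norm_num)]
    have hmod : PySem.Int.mod ((q : Int) * s) (10 * s) = ((q % 10 : Nat) : Int) * s := by
      rw [PySem.Int.mod_eq_emod_of_pos (by positivity)]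
      have : (q : Int) * s = ((q % 10 : Nat) : Int) * s + (10 * s) * ((q / 10 : Nat) : Int) := by
        push_cast
        nlinarith [Nat.div_add_mod q 10]
      rw [this, Int.add_mul_emod_self_left]
      rw [Int.emod_eq_of_lt (by positivity) ?_]
      have hlt : ((q % 10 : Nat) : Int) < 10 := by
        exact_mod_cast Nat.mod_lt q (by norm_num)
      nlinarith
    have hcoef : PySem.Int.floordiv (((q % 10 : Nat) : Int) * s) s = ((q % 10 : Nat) : Int) := by
      rw [PySem.Int.floordiv_eq_ediv_of_pos hs, Int.mul_ediv_cancel _ (by omega)]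
    simp only [hfix, hmod, hcoef]
    have hx' : (q : Int) * s - ((q % 10 : Nat) : Int) * s = ((q / 10 : Nat) : Int) * (10 * s) := by
      push_cast
      nlinarith [Nat.div_add_mod q 10]
    rw [sdigits1]
    by_cases h10 : q < 10
    · have hq0 : q / 10 = 0 := Nat.div_eq_of_lt h10
      have : (q : Int) * s - ((q % 10 : Nat) : Int) * s = 0 := by rw [hx', hq0]; simp
      rw [if_pos this, if_pos h10]
      have : q % 10 = q := Nat.mod_eq_of_lt h10
      simp [this]
    · have hq0 : q / 10 ≠ 0 := by
        intro h; have := Nat.lt_of_div_eq_zero (by norm_num) h; omega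
      have hne : ¬ ((q : Int) * s - ((q % 10 : Nat) : Int) * s = 0) := by
        rw [hx']
        have : (0:Int) < ((q / 10 : Nat) : Int) := by exact_mod_cast Nat.pos_of_ne_zero hq0
        positivity
      rw [if_neg hne, if_neg h10, hx']
      have hf1 : 1 ≤ f := by
        by_contra h
        have : f = 0 := by omega
        subst this
        simp at hq; omega
      have hqf : ((q / 10 : Nat) : Int) < 10 ^ f := by
        have : (q : Int) < 10 ^ (f + 1) := hq
        have h2 : (q : Int) / 10 < 10 ^ f := by
          rw [Int.ediv_lt_iff_lt_mul (by norm_num)]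
          calc (q : Int) < 10 ^ (f + 1) := this
            _ = 10 ^ f * 10 := by ring
        calc ((q / 10 : Nat) : Int) = (q : Int) / 10 := by rw [Int.natCast_div]; norm_num
          _ < 10 ^ f := h2
      have hstep : (10 : Int) * s * 10 = 10 * (10 * s) := by ring
      rw [hstep, ih (q / 10) (10 * s) _ (by positivity) hqf hf1]
      simp

-- appending one zero per loop iteration is appending a replicate
lemma foldl_append_zero {α : Type} (l : List α) (init : List Int) :
    l.foldl (fun cs _ => cs ++ [(0 : Int)]) init = init ++ List.replicate l.length 0 := by
  induction l generalizing init with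
  | nil => simp
  | cons a t ih => simp [ih, List.replicate_succ]

-- A's slicing comprehension over range(0, len, 3), as a sum over Nat triples
lemma A_sum_eq (L : List Int) (hL : L.length % 3 = 0) :
    ((PySem.List.pyRange 0 (L.length : Int) 3).map
       (fun i => (-1 : Int) ^ i.toNat * (PySem.List.slice L (some i) (some (i + 3))).prod)).sum
    = ((List.range (L.length / 3)).map
       (fun k => (-1 : Int) ^ k * ((L.drop (3 * k)).take 3).prod)).sum := by
  rw [PySem.List.pyRange_of_pos 0 (L.length : Int) (by norm_num : (0:Int) < 3)]
  have hcnt : (if (0:Int) < (L.length : Int) then (((L.length : Int) - 0 + 3 - 1) / 3).toNat else 0)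
      = L.length / 3 := by
    by_cases h0 : 0 < L.length
    · rw [if_pos (by exact_mod_cast h0)]
      have h1 : ((L.length : Int) - 0 + 3 - 1) = ((L.length + 2 : Nat) : Int) := by push_cast; ring
      have h2 : ((L.length + 2 : Nat) : Int) / 3 = (((L.length + 2) / 3 : Nat) : Int) := by
        rw [Int.natCast_div]; norm_num
      rw [h1, h2, Int.toNat_natCast]
      omega
    · rw [if_neg (by omega : ¬ (0:Int) < (L.length : Int))]
      omega
  rw [hcnt, List.map_map]
  refine congrArg List.sum (List.map_congr_left ?_)
  intro k hk
  simp only [Function.comp_apply]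
  have h1 : (0 : Int) + 3 * (k : Int) = ((3 * k : Nat) : Int) := by push_cast; ring
  rw [h1]
  have h2 : (((3 * k : Nat) : Int)).toNat = 3 * k := Int.toNat_natCast _
  rw [h2]
  have h3 : ((3 * k : Nat) : Int) + 3 = ((3 * k : Nat) : Int) + ((3 : Nat) : Int) := by norm_num
  rw [h3, PySem.List.slice_natCast_add L (3 * k) 3]
  have h4 : (-1 : Int) ^ (3 * k) = (-1 : Int) ^ k := by
    rw [pow_mul]; norm_num
  rw [h4]

-- zero padding to a multiple of three does not change the triple sum
lemma S_pad (ds : List Int) (p : Nat) (hp : (ds.length + p) % 3 = 0) (hplt : p < 3) :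
    ((List.range ((ds.length + p) / 3)).map
       (fun k => (-1 : Int) ^ k * (((ds ++ List.replicate p 0).drop (3 * k)).take 3).prod)).sum
    = ((List.range (ds.length / 3)).map
       (fun k => (-1 : Int) ^ k * ((ds.drop (3 * k)).take 3).prod)).sum := by
  by_cases hp0 : p = 0
  · subst hp0; simp
  · have hm : (ds.length + p) / 3 = ds.length / 3 + 1 := by omega
    have h3m : 3 * (ds.length / 3) ≤ ds.length := by omega
    rw [hm, List.range_succ, List.map_append, List.sum_append]
    have hlast : (-1 : Int) ^ (ds.length / 3)
        * (((ds ++ List.replicate p 0).drop (3 * (ds.length / 3))).take 3).prod = 0 := by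
      rw [List.drop_append_of_le_length h3m]
      have hl3 : (ds.drop (3 * (ds.length / 3)) ++ List.replicate p 0).length = 3 := by
        simp; omega
      rw [List.take_of_length_le (by omega), List.prod_append, List.prod_replicate,
        zero_pow hp0]
      ring
    have hcong : ∀ k ∈ List.range (ds.length / 3),
        (-1 : Int) ^ k * (((ds ++ List.replicate p 0).drop (3 * k)).take 3).prod
        = (-1 : Int) ^ k * ((ds.drop (3 * k)).take 3).prod := by
      intro k hk
      rw [List.mem_range] at hk
      have hk3 : 3 * k + 3 ≤ ds.length := by omega
      rw [List.drop_append_of_le_length (by omega), List.take_append_of_le_length (by simp; omega)]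
    rw [List.map_congr_left hcong]
    simp [hlast]

-- ===== B-side lemmas =====

-- the (≤ 3)-digit product of one base-1000 chunk, as B computes it
def cp (c : Nat) : Int := ((c % 10 : Nat) : Int) * ((c / 10 % 10 : Nat) : Int) * ((c / 100 : Nat) : Int)

-- the mathematical content of B's helper 'alt'
def altN (n : Nat) : Int :=
  if h : n = 0 then 0 else cp (n % 1000) - altN (n / 1000)
decreasing_by exact Nat.div_lt_self (Nat.pos_of_ne_zero h) (by norm_num)

lemma sum_map_neg {α : Type} (l : List α) (f : α → Int) :
    (l.map (fun a => -(f a))).sum = -((l.map f).sum) := by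
  induction l with
  | nil => simp
  | cons a t ih => simp [ih]; ring

lemma altLoop_eq (fuel : Nat) : ∀ (x : Int), 0 ≤ x → x < 1000 ^ fuel →
    altLoop fuel x = altN x.toNat := by
  induction fuel with
  | zero =>
    intro x h0 h1
    have hx : x = 0 := by simp at h1; omega
    subst hx
    rw [altN]
    simp [altLoop]
  | succ f ih =>
    intro x h0 h1
    rw [altLoop]
    by_cases hx : x = 0
    · subst hx; rw [altN]; simp
    · rw [if_neg hx]
      have hxe : x = ((x.toNat : Nat) : Int) := by omega
      set n := x.toNat with hn
      have hc : PySem.Int.mod x 1000 = ((n % 1000 : Nat) : Int) := by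
        rw [hxe]; exact_mod_cast PySem.Int.mod_natCast n 1000
      have hc10 : PySem.Int.mod ((n % 1000 : Nat) : Int) 10 = ((n % 1000 % 10 : Nat) : Int) := by
        exact_mod_cast PySem.Int.mod_natCast (n % 1000) 10
      have hcd10 : PySem.Int.floordiv ((n % 1000 : Nat) : Int) 10 = ((n % 1000 / 10 : Nat) : Int) := by
        exact_mod_cast PySem.Int.floordiv_natCast (n % 1000) 10
      have hcd10m : PySem.Int.mod ((n % 1000 / 10 : Nat) : Int) 10 = ((n % 1000 / 10 % 10 : Nat) : Int) := by
        exact_mod_cast PySem.Int.mod_natCast (n % 1000 / 10) 10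
      have hcd100 : PySem.Int.floordiv ((n % 1000 : Nat) : Int) 100 = ((n % 1000 / 100 : Nat) : Int) := by
        exact_mod_cast PySem.Int.floordiv_natCast (n % 1000) 100
      have hdiv : PySem.Int.floordiv x 1000 = ((n / 1000 : Nat) : Int) := by
        rw [hxe]; exact_mod_cast PySem.Int.floordiv_natCast n 1000
      have hrec : altLoop f (PySem.Int.floordiv x 1000) = altN (n / 1000) := by
        rw [hdiv, ih ((n / 1000 : Nat) : Int) (by positivity) ?_]
        · congr 1
        · have hlt : (n : Int) < 1000 ^ (f + 1) := by rw [← hxe]; exact h1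
          have h2 : ((n / 1000 : Nat) : Int) = (n : Int) / 1000 := by
            rw [Int.natCast_div]; norm_num
          rw [h2, Int.ediv_lt_iff_lt_mul (by norm_num)]
          calc (n : Int) < 1000 ^ (f + 1) := hlt
            _ = 1000 ^ f * 1000 := by ring
      simp only [hc, hc10, hcd10, hcd10m, hcd100, hrec]
      have hn0 : n ≠ 0 := by omega
      conv_rhs => rw [altN, dif_neg hn0]
      rfl

lemma pow1000 (k : Nat) : (1000 : Nat) ^ k = 10 ^ (3 * k) := by
  rw [show (1000 : Nat) = 10 ^ 3 from rfl, ← pow_mul]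

-- closed form of altN as an alternating chunk sum
lemma altN_closed (M : Nat) : ∀ (n : Nat), n < 1000 ^ M →
    altN n = ((List.range M).map (fun k => (-1 : Int) ^ k * cp (n / 1000 ^ k % 1000))).sum := by
  induction M with
  | zero =>
    intro n h
    have : n = 0 := by simpa using h
    subst this
    rw [altN]; simp
  | succ M ih =>
    intro n h
    rw [List.range_succ_eq_map, List.map_cons, List.sum_cons, List.map_map]
    by_cases hn : n = 0
    · subst hn
      rw [altN]
      have hz : ∀ k ∈ List.range M,
          (((fun k => (-1 : Int) ^ k * cp (0 / 1000 ^ k % 1000)) ∘ (· + 1)) k) = 0 := by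
        intro k _
        simp [cp]
      rw [List.map_congr_left hz]
      simp [cp]
    · rw [altN, dif_neg hn]
      have hrec : n / 1000 < 1000 ^ M := by
        rw [Nat.div_lt_iff_lt_mul (by norm_num)]
        calc n < 1000 ^ (M + 1) := h
          _ = 1000 ^ M * 1000 := by ring
      rw [ih (n / 1000) hrec]
      have hterm : ∀ k ∈ List.range M,
          (((fun k => (-1 : Int) ^ k * cp (n / 1000 ^ k % 1000)) ∘ (· + 1)) k)
          = -((-1 : Int) ^ k * cp (n / 1000 / 1000 ^ k % 1000)) := by
        intro k _
        simp only [Function.comp_apply]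
        have hdd : n / 1000 ^ (k + 1) = n / 1000 / 1000 ^ k := by
          rw [pow_succ', Nat.div_div_eq_div_mul]
        rw [hdd, pow_succ]
        ring
      rw [List.map_congr_left hterm, sum_map_neg]
      simp [cp]
      ring

-- the digit list drops by powers of ten
lemma sdigits_drop (j : Nat) : ∀ (n : Nat), (sdigits n).drop j = sdigits (n / 10 ^ j) := by
  induction j with
  | zero => intro n; simp
  | succ j ih =>
    intro n
    have h0 : sdigits 0 = [] := by rw [sdigits]; simp
    by_cases hn : n = 0
    · subst hn
      simp [h0]
    · rw [sdigits, dif_neg hn]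
      have hstep : (n % 10 :: sdigits (n / 10)).drop (j + 1) = (sdigits (n / 10)).drop j := rfl
      rw [hstep, ih (n / 10)]
      congr 1
      rw [Nat.div_div_eq_div_mul, pow_succ']

-- magnitude bounds from the digit-list length
lemma sdigits_lt (n : Nat) : n < 10 ^ (sdigits n).length := by
  induction n using Nat.strong_induction_on with
  | _ n ih =>
    by_cases hn : n = 0
    · subst hn; rw [sdigits]; simp
    · rw [sdigits, dif_neg hn]
      have h := ih (n / 10) (Nat.div_lt_self (Nat.pos_of_ne_zero hn) (by norm_num))
      simp only [List.length_cons]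
      have hlt : n < 10 * 10 ^ (sdigits (n / 10)).length := by
        have := Nat.div_add_mod n 10
        omega
      calc n < 10 * 10 ^ (sdigits (n / 10)).length := hlt
        _ = 10 ^ ((sdigits (n / 10)).length + 1) := by rw [pow_succ]; ring

lemma sdigits_len_le (j : Nat) : ∀ (n : Nat), n < 10 ^ j → (sdigits n).length ≤ j := by
  induction j with
  | zero =>
    intro n h
    have : n = 0 := by omega
    subst this; rw [sdigits]; simp
  | succ j ih =>
    intro n h
    by_cases hn : n = 0
    · subst hn; rw [sdigits]; simp
    · rw [sdigits, dif_neg hn]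
      simp only [List.length_cons]
      have hlt : n / 10 < 10 ^ j := by
        rw [Nat.div_lt_iff_lt_mul (by norm_num)]
        calc n < 10 ^ (j + 1) := h
          _ = 10 ^ j * 10 := by rw [pow_succ]
      exact Nat.succ_le_succ (ih _ hlt)

-- a length-≥3 digit list forces n ≥ 100
lemma sdigits_ge3 (n : Nat) (h : 3 ≤ (sdigits n).length) : 100 ≤ n := by
  by_contra hlt
  have := sdigits_len_le 2 n (by omega)
  omega

-- a small chunk (fewer than three digits) has product 0
lemma cp_small (m : Nat) (h : m < 100) : cp (m % 1000) = 0 := by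
  have h1 : m % 1000 = m := by omega
  have h2 : m / 100 = 0 := by omega
  unfold cp
  rw [h1, h2]
  simp

-- a complete triple of the digit list is the chunk product
lemma triple_cp_core (m : Nat) (h : 3 ≤ (sdigits m).length) :
    ((((sdigits m).map (fun d : Nat => (d : Int))).take 3).prod) = cp (m % 1000) := by
  have h100 : 100 ≤ m := sdigits_ge3 m h
  have hm0 : m ≠ 0 := by omega
  have hm1 : m / 10 ≠ 0 := by omega
  have hm2 : m / 10 / 10 ≠ 0 := by omega
  rw [sdigits, dif_neg hm0, sdigits, dif_neg hm1, sdigits, dif_neg hm2]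
  simp only [List.map_cons, List.take_succ_cons, List.take_zero, List.prod_cons, List.prod_nil,
    mul_one]
  unfold cp
  have e1 : m % 1000 % 10 = m % 10 := by omega
  have e2 : m % 1000 / 10 % 10 = m / 10 % 10 := by omega
  have e3 : m % 1000 / 100 = m / 10 / 10 % 10 := by omega
  rw [e1, e2, e3]
  push_cast
  ring

lemma triple_eq_cp (n k : Nat) (h : 3 * k + 3 ≤ (sdigits n).length) :
    (((((sdigits n).map (fun d : Nat => (d : Int))).drop (3 * k)).take 3).prod) = cp (n / 1000 ^ k % 1000) := by
  have hkey : ((sdigits n).map (fun d : Nat => (d : Int))).drop (3 * k)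
      = (sdigits (n / 10 ^ (3 * k))).map (fun d : Nat => (d : Int)) := by
    rw [Eq.symm List.map_drop, sdigits_drop (3 * k) n]
  rw [hkey]
  have hchunk : n / 1000 ^ k = n / 10 ^ (3 * k) := by rw [pow1000]
  rw [hchunk]
  apply triple_cp_core
  have hlen := congrArg List.length (sdigits_drop (3 * k) n)
  rw [List.length_drop] at hlen
  omega

-- the two alternating sums agree (A: over complete digit triples; B: over base-1000 chunks)
lemma sums_eq (n : Nat) (hn : n < 10 ^ 10) :
    ((List.range ((sdigits n).length / 3)).map
       (fun k => (-1 : Int) ^ k * ((((sdigits n).map (fun d : Nat => (d : Int))).drop (3 * k)).take 3).prod)).sum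
    = ((List.range 4).map (fun k => (-1 : Int) ^ k * cp (n / 1000 ^ k % 1000))).sum := by
  set d := (sdigits n).length with hd
  have hdle : d ≤ 10 := sdigits_len_le 10 n hn
  have hq : d / 3 ≤ 4 := by omega
  have hsplit : (4 : Nat) = d / 3 + (4 - d / 3) := by omega
  rw [hsplit, List.range_add, List.map_append, List.sum_append]
  have hfirst : ∀ k ∈ List.range (d / 3),
      (-1 : Int) ^ k * ((((sdigits n).map (fun d : Nat => (d : Int))).drop (3 * k)).take 3).prod
      = (-1 : Int) ^ k * cp (n / 1000 ^ k % 1000) := by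
    intro k hk
    rw [List.mem_range] at hk
    rw [triple_eq_cp n k (by omega)]
  have hsecond : ∀ j ∈ List.range (4 - d / 3),
      ((fun k => (-1 : Int) ^ k * cp (n / 1000 ^ k % 1000)) (d / 3 + j)) = 0 := by
    intro j _
    show (-1 : Int) ^ (d / 3 + j) * cp (n / 1000 ^ (d / 3 + j) % 1000) = 0
    have hnd : n < 10 ^ d := sdigits_lt n
    have hsmall : n / 1000 ^ (d / 3 + j) < 100 := by
      rw [pow1000, Nat.div_lt_iff_lt_mul (Nat.pow_pos (by norm_num))]
      calc n < 10 ^ d := hnd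
        _ ≤ 10 ^ (3 * (d / 3 + j) + 2) := Nat.pow_le_pow_right (by norm_num) (by omega)
        _ = 100 * 10 ^ (3 * (d / 3 + j)) := by rw [pow_add]; ring
    rw [cp_small _ hsmall]
    ring
  rw [List.map_congr_left hfirst]
  have hmap2 : ((List.range (4 - d / 3)).map ((d / 3 + ·))).map
      (fun k => (-1 : Int) ^ k * cp (n / 1000 ^ k % 1000))
      = (List.range (4 - d / 3)).map (fun _ => (0 : Int)) := by
    rw [List.map_map]
    exact List.map_congr_left (fun j hj => hsecond j hj)
  rw [hmap2]
  simp

-- ===== VERDICT (by name: the statement is the Claim_ definition above) =====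
theorem is_div_by_7_spec : Claim_equal_is_div_by_7 := by
  intro x hdom hpre
  unfold Spec_is_div_by_7
  by_cases hx0 : x = 0
  · subst hx0; decide
  · have hxpos : 0 < x := lt_of_le_of_ne hpre (Ne.symm hx0)
    have hbound : x ≤ 2147483648 := by
      unfold Dom_is_div_by_7 pvDomInt at hdom
      simp only [decide_eq_true_eq] at hdom
      exact hdom.2
    have hbig : x < 10 ^ 64 := by
      calc x ≤ 2147483648 := hbound
        _ < 10 ^ 64 := by norm_num
    have hxn : x = (x.toNat : Int) := by omega
    have hn0 : x.toNat ≠ 0 := by omega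
    set n := x.toNat with hnd
    have hnsmall : n < 10 ^ 10 := by omega
    have hA : gbcLoop 64 x 10 [] = (sdigits n).map (fun d : Nat => (d : Int)) := by
      have h1 : x = ((n : Int)) * 1 := by omega
      have h2 : (10 : Int) = 10 * 1 := by norm_num
      conv_lhs => rw [h1, h2]
      rw [gbcLoop_eq 64 n 1 [] (by norm_num) (by omega) (by norm_num)]
      rw [sdigits1_eq, if_neg hn0]
      simp
    set ds : List Int := (sdigits n).map (fun d : Nat => (d : Int)) with hds
    -- A side closed form
    have hAside : is_div_by_7 x
        = decide (PySem.Int.mod (((List.range (ds.length / 3)).map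
            (fun k => (-1 : Int) ^ k * ((ds.drop (3 * k)).take 3).prod)).sum) 7 = 0) := by
      rw [is_div_by_7, get_base_coefficient, hA]
      have hmodc : PySem.Int.mod ((ds.length : Nat) : Int) 3 = ((ds.length % 3 : Nat) : Int) := by
        exact_mod_cast PySem.Int.mod_natCast ds.length 3
      rw [hmodc]
      by_cases hm3 : ds.length % 3 = 0
      · rw [hm3, if_neg (by norm_num : ¬ ((0 : Nat) : Int) ≠ 0), A_sum_eq ds hm3]
      · have hpad : (3 : Int) - ((ds.length % 3 : Nat) : Int) = ((3 - ds.length % 3 : Nat) : Int) := by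
          have : ds.length % 3 < 3 := Nat.mod_lt _ (by norm_num)
          push_cast [Nat.cast_sub (le_of_lt this)]
          ring
        rw [if_pos (by exact_mod_cast hm3), hpad, PySem.List.pyRange_one, List.foldl_map]
        rw [foldl_append_zero]
        have hlrep : (List.range ((((3 - ds.length % 3 : Nat) : Int)) - 0).toNat).length
            = 3 - ds.length % 3 := by simp
        rw [hlrep]
        have hlen2 : (ds ++ List.replicate (3 - ds.length % 3) (0 : Int)).length % 3 = 0 := by
          simp; omega
        rw [A_sum_eq _ hlen2]
        simp only [List.length_append, List.length_replicate]
        rw [S_pad ds (3 - ds.length % 3) (by omega) (by omega)]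
    -- B side closed form
    have hBside : is_div_by_7_alt x
        = decide (PySem.Int.mod (((List.range 4).map
            (fun k => (-1 : Int) ^ k * cp (n / 1000 ^ k % 1000))).sum) 7 = 0) := by
      rw [is_div_by_7_alt]
      rw [altLoop_eq 64 x hpre (by calc x ≤ 2147483648 := hbound
            _ < 1000 ^ 64 := by norm_num)]
      rw [← hnd, altN_closed 4 n (by omega)]
    rw [hAside, hBside]
    have hdsl : ds.length = (sdigits n).length := by rw [hds]; simp
    rw [hdsl]
    rw [sums_eq n hnsmall]
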